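-- pv_equiv track=rewrite | github.com/sukhada-sukhada/lc4eu | USR-to-hindi/common.py | add_additional_words
-- ===== SOURCE A (Python) =====
-- def add_additional_words(additional_words_dict, processed_data):
--     additionalData = []
--
--     for data in processed_data:
--         index = data[0]
--         if index in additional_words_dict:
--             temp = list(data)
--             term = additional_words_dict[index]
--             for t in term:
--                 tag = t[0]
--                 val = t[1]
--                 if tag == 'before':
--                     temp[1] = val + ' ' + temp[1]
--                 else:
--                     temp[1] = temp[1] + ' ' + val
--             data = tuple(temp)
--         additionalData.append(data)
--
--     return additionalData
-- ===== SOURCE B (Python) =====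
-- def add_additional_words(additional_words_dict, processed_data):
--     deco = {}
--     for index, term in additional_words_dict.items():
--         before = [val for tag, val in term if tag == 'before']
--         after = [val for tag, val in term if tag != 'before']
--         deco[index] = (before[::-1], after)
--     return [(d[0], ' '.join(deco[d[0]][0] + [d[1]] + deco[d[0]][1])) if d[0] in deco else d
--             for d in processed_data]
-- ===== Notes on version B (the rewrite author's own statement) =====
-- stated objective: alternative
-- what changed: B precomputes, once per dictionary entry, a (reversed-before-list, after-list) pair via comprehensions, then produces the result as a single list comprehension whose matched rows are one ' '.join -- no per-row inner fold and no repeated string prepend/append.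
import Mathlib
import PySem

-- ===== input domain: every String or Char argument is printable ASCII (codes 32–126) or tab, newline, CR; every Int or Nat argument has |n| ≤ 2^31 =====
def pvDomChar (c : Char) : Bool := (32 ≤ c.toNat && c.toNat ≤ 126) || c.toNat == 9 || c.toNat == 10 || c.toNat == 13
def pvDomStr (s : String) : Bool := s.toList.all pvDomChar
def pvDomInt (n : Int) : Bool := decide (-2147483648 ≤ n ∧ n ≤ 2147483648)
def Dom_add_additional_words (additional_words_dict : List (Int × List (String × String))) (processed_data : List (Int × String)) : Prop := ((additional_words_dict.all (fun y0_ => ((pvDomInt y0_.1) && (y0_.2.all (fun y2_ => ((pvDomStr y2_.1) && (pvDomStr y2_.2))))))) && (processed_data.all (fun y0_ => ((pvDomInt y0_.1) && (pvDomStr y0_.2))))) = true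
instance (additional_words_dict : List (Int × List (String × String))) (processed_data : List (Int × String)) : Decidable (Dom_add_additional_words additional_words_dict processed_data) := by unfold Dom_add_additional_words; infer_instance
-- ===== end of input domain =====

-- B precomputes a (reversed-before, after) pair per dictionary entry and builds the result
-- as one list comprehension with a single ' '.join per matched row (objective: alternative).

-- ===== PORT A =====
def add_additional_words (additional_words_dict : List (Int × List (String × String))) (processed_data : List (Int × String)) : List (Int × String) :=
  let d := PySem.Dict.ofList additional_words_dict
  processed_data.foldl (fun additionalData data =>
    match PySem.Dict.get? d data.1 with
    | some term =>
        let v := term.foldl (fun v t =>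
          if t.1 == "before" then t.2 ++ " " ++ v else v ++ " " ++ t.2) data.2
        additionalData ++ [(data.1, v)]
    | none => additionalData ++ [data]) []

-- ===== PORT B =====
def add_additional_words_alt (additional_words_dict : List (Int × List (String × String))) (processed_data : List (Int × String)) : List (Int × String) :=
  let deco := PySem.Dict.ofList
    ((PySem.Dict.ofList additional_words_dict).items.map (fun kt =>
      (kt.1,
       (((kt.2.filter (fun t => t.1 == "before")).map Prod.snd).reverse,
        (kt.2.filter (fun t => !(t.1 == "before"))).map Prod.snd))))
  processed_data.map (fun d =>
    match PySem.Dict.get? deco d.1 with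
    | some p => (d.1, PySem.Str.join " " (p.1 ++ [d.2] ++ p.2))
    | none => d)

-- ===== PRECONDITION & SPEC =====
def Spec_add_additional_words (additional_words_dict : List (Int × List (String × String))) (processed_data : List (Int × String)) (out : List (Int × String)) : Prop := out = add_additional_words_alt additional_words_dict processed_data
instance (additional_words_dict : List (Int × List (String × String))) (processed_data : List (Int × String)) (out : List (Int × String)) : Decidable (Spec_add_additional_words additional_words_dict processed_data out) := by unfold Spec_add_additional_words; infer_instance

-- ===== CLAIM (what is proved, stated in full; the proofs are below) =====
def Claim_equal_add_additional_words : Prop := ∀ (additional_words_dict : List (Int × List (String × String))) (processed_data : List (Int × String)), Dom_add_additional_words additional_words_dict processed_data → Spec_add_additional_words additional_words_dict processed_data (add_additional_words additional_words_dict processed_data)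

-- ===== LEMMAS AND PROOFS =====

theorem charsJoin_cons_of_ne_nil (sep x : List Char) (l : List (List Char)) (h : l ≠ []) :
    PySem.Chars.join sep (x :: l) = x ++ sep ++ PySem.Chars.join sep l := by
  cases l with
  | nil => exact absurd rfl h
  | cons y ys => exact PySem.Chars.join_cons_cons sep x y ys

theorem charsJoin_merge (sep : List Char) (xs : List (List Char)) (a b : List Char)
    (ys : List (List Char)) :
    PySem.Chars.join sep (xs ++ (a ++ sep ++ b) :: ys) = PySem.Chars.join sep (xs ++ a :: b :: ys) := by
  induction xs with
  | nil =>
      cases ys with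
      | nil =>
          simp only [List.nil_append]
          rw [PySem.Chars.join_singleton, PySem.Chars.join_cons_cons, PySem.Chars.join_singleton]
      | cons y ys =>
          simp only [List.nil_append]
          rw [PySem.Chars.join_cons_cons, PySem.Chars.join_cons_cons, PySem.Chars.join_cons_cons]
          simp [List.append_assoc]
  | cons x xs ih =>
      rw [List.cons_append, List.cons_append,
        charsJoin_cons_of_ne_nil sep x _ (by simp),
        charsJoin_cons_of_ne_nil sep x _ (by simp), ih]

theorem strJoin_merge (xs : List String) (a b : String) (ys : List String) :
    PySem.Str.join " " (xs ++ (a ++ " " ++ b) :: ys) = PySem.Str.join " " (xs ++ a :: b :: ys) := by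
  unfold PySem.Str.join
  congr 1
  simp only [List.map_append, List.map_cons, String.toList_append]
  exact charsJoin_merge _ _ _ _ _

def befs (term : List (String × String)) : List String :=
  (term.filter (fun t => t.1 == "before")).map Prod.snd

def afts (term : List (String × String)) : List String :=
  (term.filter (fun t => !(t.1 == "before"))).map Prod.snd

theorem strJoin_singleton (s : String) : PySem.Str.join " " [s] = s := by
  unfold PySem.Str.join
  rw [List.map_singleton, PySem.Chars.join_singleton]
  exact String.ofList_toList

theorem foldA_eq (term : List (String × String)) (s : String) :
    term.foldl (fun v t => if t.1 == "before" then t.2 ++ " " ++ v else v ++ " " ++ t.2) s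
      = PySem.Str.join " " ((befs term).reverse ++ s :: afts term) := by
  induction term generalizing s with
  | nil => simp [befs, afts, strJoin_singleton]
  | cons t ts ih =>
      by_cases h : t.1 = "before"
      · simp only [List.foldl_cons, h, beq_self_eq_true, if_true, ih, befs, afts,
          List.filter_cons, Bool.not_true, Bool.false_eq_true, if_false,
          List.map_cons, List.reverse_cons]
        rw [List.append_assoc]
        simp only [List.singleton_append]
        exact strJoin_merge _ _ _ _
      · have hb : (t.1 == "before") = false := by simp [h]
        simp only [List.foldl_cons, hb, Bool.false_eq_true, if_false, ih, befs, afts,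
          List.filter_cons, Bool.not_false, if_true, List.map_cons]
        exact strJoin_merge _ _ _ _

-- deco lookup: the value-mapped rebuild of a nodup-keys dict looks up to the mapped value
theorem get?_ofList_items_map {ν ω : Type} (d : PySem.Dict Int ν) (f : ν → ω) (k : Int)
    (hnd : d.keys.Nodup) :
    (PySem.Dict.ofList (d.items.map (fun p => (p.1, f p.2)))).get? k = (d.get? k).map f := by
  have hkeys : (d.items.map (fun p => (p.1, f p.2))).map Prod.fst = d.keys := by
    simp [PySem.Dict.keys, List.map_map, Function.comp]
  have hofl : PySem.Dict.ofList (d.items.map (fun p => (p.1, f p.2)))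
      = (d.items.map (fun p => (p.1, f p.2))).foldl (fun d p => d.insert p.1 p.2)
          PySem.Dict.empty := rfl
  have hitems : (PySem.Dict.ofList (d.items.map (fun p => (p.1, f p.2)))).items
      = d.items.map (fun p => (p.1, f p.2)) := by
    rw [hofl]
    have := PySem.Dict.items_foldl_insert_fresh (d.items.map (fun p => (p.1, f p.2)))
      Prod.fst Prod.snd PySem.Dict.empty
      (by intro a _; exact PySem.Dict.contains_empty _)
      (by rw [hkeys]; exact hnd)
    simpa using this
  have hnd' : (PySem.Dict.ofList (d.items.map (fun p => (p.1, f p.2)))).keys.Nodup := by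
    simpa [PySem.Dict.keys, hitems, hkeys] using hnd
  cases hv : d.get? k with
  | some v =>
      have hmem : (k, v) ∈ d.items := PySem.Dict.mem_items_of_get?_eq_some d hv
      have hmem' : (k, f v) ∈ (PySem.Dict.ofList (d.items.map (fun p => (p.1, f p.2)))).items := by
        rw [hitems]
        exact List.mem_map.mpr ⟨(k, v), hmem, rfl⟩
      rw [PySem.Dict.get?_of_mem_items _ hmem' hnd']
      rfl
  | none =>
      have hk : k ∉ d.keys := (PySem.Dict.get?_eq_none_iff_not_mem_keys _ _).mp hv
      rw [(PySem.Dict.get?_eq_none_iff_not_mem_keys _ _).mpr (by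
        simpa [PySem.Dict.keys, hitems, hkeys] using hk)]
      rfl

theorem main_fold (awd : List (Int × List (String × String))) (pd : List (Int × String)) :
    ∀ (acc : List (Int × String)),
      pd.foldl (fun additionalData data =>
        match PySem.Dict.get? (PySem.Dict.ofList awd) data.1 with
        | some term =>
            additionalData ++ [(data.1, term.foldl (fun v t =>
              if t.1 == "before" then t.2 ++ " " ++ v else v ++ " " ++ t.2) data.2)]
        | none => additionalData ++ [data]) acc
      = acc ++ pd.map (fun d =>
          match PySem.Dict.get? (PySem.Dict.ofList
              ((PySem.Dict.ofList awd).items.map (fun kt =>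
                (kt.1,
                 (((kt.2.filter (fun t => t.1 == "before")).map Prod.snd).reverse,
                  (kt.2.filter (fun t => !(t.1 == "before"))).map Prod.snd))))) d.1 with
          | some p => (d.1, PySem.Str.join " " (p.1 ++ [d.2] ++ p.2))
          | none => d) := by
  have hdeco : ∀ k : Int,
      PySem.Dict.get? (PySem.Dict.ofList
        ((PySem.Dict.ofList awd).items.map (fun kt =>
          (kt.1,
           (((kt.2.filter (fun t => t.1 == "before")).map Prod.snd).reverse,
            (kt.2.filter (fun t => !(t.1 == "before"))).map Prod.snd))))) k
      = (PySem.Dict.get? (PySem.Dict.ofList awd) k).map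
          (fun term => (((term.filter (fun t => t.1 == "before")).map Prod.snd).reverse,
            (term.filter (fun t => !(t.1 == "before"))).map Prod.snd)) := fun k =>
    get?_ofList_items_map (PySem.Dict.ofList awd)
      (fun term => (((term.filter (fun t => t.1 == "before")).map Prod.snd).reverse,
        (term.filter (fun t => !(t.1 == "before"))).map Prod.snd)) k
      (PySem.Dict.nodup_keys_ofList awd)
  induction pd with
  | nil => intro acc; simp
  | cons x xs ih =>
      intro acc
      simp only [List.foldl_cons, List.map_cons]
      rw [hdeco x.1]
      cases hv : PySem.Dict.get? (PySem.Dict.ofList awd) x.1 with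
      | none =>
          simp only [Option.map_none]
          rw [ih]
          simp
      | some term =>
          simp only [Option.map_some]
          rw [ih, foldA_eq]
          simp [befs, afts]

-- ===== VERDICT (by name: the statement is the Claim_ definition above) =====
theorem add_additional_words_spec : Claim_equal_add_additional_words := by
  unfold Claim_equal_add_additional_words
  intro awd pd _
  unfold Spec_add_additional_words add_additional_words add_additional_words_alt
  exact (main_fold awd pd []).trans (by simp)
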